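-- pv_equiv track=rewrite | github.com/metamodernity/code_wars | Python/heavyMetallText.py | heavy_metal_umlauts
-- ===== SOURCE A (Python) =====
-- def heavy_metal_umlauts(boring_text):
--     for i in boring_text:
--         boring_text = boring_text.replace('A', 'Ä')
--         boring_text = boring_text.replace('O', 'Ö')
--         boring_text = boring_text.replace('a', 'ä')
--         boring_text = boring_text.replace('o', 'ö')
--         boring_text = boring_text.replace('E', 'Ë')
--         boring_text = boring_text.replace('U', 'Ü')
--         boring_text = boring_text.replace('e', 'ë')
--         boring_text = boring_text.replace('u', 'ü')
--         boring_text = boring_text.replace('I', 'Ï')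
--         boring_text = boring_text.replace('Y', 'Ÿ')
--         boring_text = boring_text.replace('i', 'ï')
--         boring_text = boring_text.replace('y', 'ÿ')
--     heavy_metal_text = boring_text
--     return heavy_metal_text
-- ===== SOURCE B (Python) =====
-- _TABLE = str.maketrans('AOaoEUeuIYiy', 'ÄÖäöËÜëüÏŸïÿ')
--
-- def heavy_metal_umlauts(boring_text):
--     return boring_text.translate(_TABLE)
-- ===== Notes on version B (the rewrite author's own statement) =====
-- stated objective: faster
-- what changed: Replaced A's outer loop over every character, each iteration re-running twelve full str.replace passes over the whole string, with a translation table built once and a single translate pass.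
import Mathlib
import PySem

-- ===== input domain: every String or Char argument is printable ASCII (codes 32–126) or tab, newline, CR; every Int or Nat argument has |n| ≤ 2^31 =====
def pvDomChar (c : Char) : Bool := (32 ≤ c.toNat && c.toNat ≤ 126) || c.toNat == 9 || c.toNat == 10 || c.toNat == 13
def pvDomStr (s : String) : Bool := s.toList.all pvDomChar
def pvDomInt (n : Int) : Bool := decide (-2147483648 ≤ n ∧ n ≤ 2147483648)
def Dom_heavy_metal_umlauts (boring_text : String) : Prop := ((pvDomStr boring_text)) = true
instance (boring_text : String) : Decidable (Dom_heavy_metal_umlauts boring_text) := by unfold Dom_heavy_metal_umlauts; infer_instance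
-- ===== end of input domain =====

-- B builds the 12-vowel translation table once and translates in a single pass,
-- instead of A's loop over every character re-running 12 full replace passes each time.

-- ===== PORT A =====
-- one loop-body iteration of A: the twelve successive replaces, in A's order
def hmuPass (s : String) : String :=
  let s := PySem.Str.replace s "A" "Ä"
  let s := PySem.Str.replace s "O" "Ö"
  let s := PySem.Str.replace s "a" "ä"
  let s := PySem.Str.replace s "o" "ö"
  let s := PySem.Str.replace s "E" "Ë"
  let s := PySem.Str.replace s "U" "Ü"
  let s := PySem.Str.replace s "e" "ë"
  let s := PySem.Str.replace s "u" "ü"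
  let s := PySem.Str.replace s "I" "Ï"
  let s := PySem.Str.replace s "Y" "Ÿ"
  let s := PySem.Str.replace s "i" "ï"
  let s := PySem.Str.replace s "y" "ÿ"
  s

-- 'for i in boring_text' iterates over the ORIGINAL string object; the body rebinds the name
def heavy_metal_umlauts (boring_text : String) : String :=
  boring_text.toList.foldl (fun acc _ => hmuPass acc) boring_text

-- ===== PORT B =====
-- the translation table, built once (str.maketrans in Source B)
def hmuTable : PySem.Dict Char Char :=
  PySem.Dict.mk
  [('A', 'Ä'), ('O', 'Ö'), ('a', 'ä'), ('o', 'ö'), ('E', 'Ë'), ('U', 'Ü'),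
   ('e', 'ë'), ('u', 'ü'), ('I', 'Ï'), ('Y', 'Ÿ'), ('i', 'ï'), ('y', 'ÿ')]

-- str.translate: each character is looked up in the table, unmapped characters pass through
def heavy_metal_umlauts_alt (boring_text : String) : String :=
  String.ofList (boring_text.toList.map (fun c => PySem.Dict.getD hmuTable c c))

-- ===== PRECONDITION & SPEC =====
def Spec_heavy_metal_umlauts (boring_text : String) (out : String) : Prop := out = heavy_metal_umlauts_alt boring_text
instance (boring_text : String) (out : String) : Decidable (Spec_heavy_metal_umlauts boring_text out) := by unfold Spec_heavy_metal_umlauts; infer_instance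

-- ===== CLAIM (what is proved, stated in full; the proofs are below) =====
def Claim_equal_heavy_metal_umlauts : Prop := ∀ (boring_text : String), Dom_heavy_metal_umlauts boring_text → Spec_heavy_metal_umlauts boring_text (heavy_metal_umlauts boring_text)

-- ===== LEMMAS AND PROOFS =====

-- B's per-character translation
def hmuTr (c : Char) : Char := PySem.Dict.getD hmuTable c c

-- the characterwise effect of one single-char replace
def hmuSub (a b c : Char) : Char := if c == a then b else c

theorem hmuSub_other (a b c : Char) (h : ¬ c = a) : hmuSub a b c = c := by
  simp [hmuSub, h]

-- single-char → single-char replace acts characterwise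
theorem replace_go_single (a b : Char) :
    ∀ (l : List Char) (fuel : Nat) (acc : List Char), l.length ≤ fuel →
      PySem.Chars.replace.go [a] [b] fuel l acc
        = acc.reverse ++ l.map (hmuSub a b) := by
  intro l
  induction l with
  | nil =>
      intro fuel acc _
      cases fuel <;> simp [PySem.Chars.replace.go]
  | cons c t ih =>
      intro fuel acc h
      cases fuel with
      | zero => simp at h
      | succ n =>
          by_cases hc : c = a
          · subst hc
            have hstep : PySem.Chars.replace.go [c] [b] (n+1) (c :: t) acc
                = PySem.Chars.replace.go [c] [b] n t ([b].reverse ++ acc) := by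
              simp [PySem.Chars.replace.go, List.isPrefixOf]
            rw [hstep, ih n ([b].reverse ++ acc) (by simpa using h)]
            simp [hmuSub]
          · have hstep : PySem.Chars.replace.go [a] [b] (n+1) (c :: t) acc
                = PySem.Chars.replace.go [a] [b] n t (c :: acc) := by
              simp [PySem.Chars.replace.go, List.isPrefixOf, Ne.symm hc]
            rw [hstep, ih n (c :: acc) (by simpa using h)]
            simp [hmuSub_other a b c hc]

theorem replace_single (a b : Char) (cs : List Char) :
    PySem.Chars.replace cs [a] [b] = cs.map (hmuSub a b) := by
  simp [PySem.Chars.replace, replace_go_single a b cs cs.length [] le_rfl]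

theorem rep_step (s : String) (a b : Char) (sa sb : String)
    (ha : sa.toList = [a]) (hb : sb.toList = [b]) :
    (PySem.Str.replace s sa sb).toList = s.toList.map (hmuSub a b) := by
  rw [PySem.Str.toList_replace, ha, hb, replace_single]

-- a character equal to none of the 12 vowels is left unchanged by B's table
theorem hmuTr_other (c : Char) (h1 : ¬ c = 'A') (h2 : ¬ c = 'O') (h3 : ¬ c = 'a')
    (h4 : ¬ c = 'o') (h5 : ¬ c = 'E') (h6 : ¬ c = 'U') (h7 : ¬ c = 'e') (h8 : ¬ c = 'u')
    (h9 : ¬ c = 'I') (h10 : ¬ c = 'Y') (h11 : ¬ c = 'i') (h12 : ¬ c = 'y') :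
    hmuTr c = c := by
  simp [hmuTr, hmuTable, PySem.Dict.getD, PySem.Dict.get?,
    Ne.symm h1, Ne.symm h2, Ne.symm h3, Ne.symm h4, Ne.symm h5, Ne.symm h6,
    Ne.symm h7, Ne.symm h8, Ne.symm h9, Ne.symm h10, Ne.symm h11, Ne.symm h12]

-- the composed effect of the twelve replaces on one character = B's translation
theorem hmuChain_eq (c : Char) :
    hmuSub 'y' 'ÿ' (hmuSub 'i' 'ï' (hmuSub 'Y' 'Ÿ' (hmuSub 'I' 'Ï' (hmuSub 'u' 'ü' (hmuSub 'e' 'ë' (hmuSub 'U' 'Ü' (hmuSub 'E' 'Ë' (hmuSub 'o' 'ö' (hmuSub 'a' 'ä' (hmuSub 'O' 'Ö' (hmuSub 'A' 'Ä' c))))))))))) = hmuTr c := by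
  by_cases h1 : c = 'A';  · subst h1; rfl
  by_cases h2 : c = 'O';  · subst h2; rfl
  by_cases h3 : c = 'a';  · subst h3; rfl
  by_cases h4 : c = 'o';  · subst h4; rfl
  by_cases h5 : c = 'E';  · subst h5; rfl
  by_cases h6 : c = 'U';  · subst h6; rfl
  by_cases h7 : c = 'e';  · subst h7; rfl
  by_cases h8 : c = 'u';  · subst h8; rfl
  by_cases h9 : c = 'I';  · subst h9; rfl
  by_cases h10 : c = 'Y';  · subst h10; rfl
  by_cases h11 : c = 'i';  · subst h11; rfl
  by_cases h12 : c = 'y';  · subst h12; rfl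
  rw [hmuSub_other 'A' 'Ä' c h1]
  rw [hmuSub_other 'O' 'Ö' c h2]
  rw [hmuSub_other 'a' 'ä' c h3]
  rw [hmuSub_other 'o' 'ö' c h4]
  rw [hmuSub_other 'E' 'Ë' c h5]
  rw [hmuSub_other 'U' 'Ü' c h6]
  rw [hmuSub_other 'e' 'ë' c h7]
  rw [hmuSub_other 'u' 'ü' c h8]
  rw [hmuSub_other 'I' 'Ï' c h9]
  rw [hmuSub_other 'Y' 'Ÿ' c h10]
  rw [hmuSub_other 'i' 'ï' c h11]
  rw [hmuSub_other 'y' 'ÿ' c h12]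
  rw [hmuTr_other c h1 h2 h3 h4 h5 h6 h7 h8 h9 h10 h11 h12]

-- one pass of A's loop body = B's characterwise translation
theorem hmuPass_toList (s : String) :
    (hmuPass s).toList = s.toList.map hmuTr := by
  show (PySem.Str.replace (PySem.Str.replace (PySem.Str.replace (PySem.Str.replace (PySem.Str.replace (PySem.Str.replace (PySem.Str.replace (PySem.Str.replace (PySem.Str.replace (PySem.Str.replace (PySem.Str.replace (PySem.Str.replace s "A" "Ä") "O" "Ö") "a" "ä") "o" "ö") "E" "Ë") "U" "Ü") "e" "ë") "u" "ü") "I" "Ï") "Y" "Ÿ") "i" "ï") "y" "ÿ").toList = s.toList.map hmuTr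
  rw [rep_step _ 'y' 'ÿ' "y" "ÿ" (by simp) (by simp)]
  rw [rep_step _ 'i' 'ï' "i" "ï" (by simp) (by simp)]
  rw [rep_step _ 'Y' 'Ÿ' "Y" "Ÿ" (by simp) (by simp)]
  rw [rep_step _ 'I' 'Ï' "I" "Ï" (by simp) (by simp)]
  rw [rep_step _ 'u' 'ü' "u" "ü" (by simp) (by simp)]
  rw [rep_step _ 'e' 'ë' "e" "ë" (by simp) (by simp)]
  rw [rep_step _ 'U' 'Ü' "U" "Ü" (by simp) (by simp)]
  rw [rep_step _ 'E' 'Ë' "E" "Ë" (by simp) (by simp)]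
  rw [rep_step _ 'o' 'ö' "o" "ö" (by simp) (by simp)]
  rw [rep_step _ 'a' 'ä' "a" "ä" (by simp) (by simp)]
  rw [rep_step _ 'O' 'Ö' "O" "Ö" (by simp) (by simp)]
  rw [rep_step _ 'A' 'Ä' "A" "Ä" (by simp) (by simp)]
  simp only [List.map_map]
  apply List.map_congr_left
  intro c _
  simp only [Function.comp_apply]
  exact hmuChain_eq c

-- the translation is idempotent: the umlaut outputs are not among the plain vowels
theorem hmuTr_idem (c : Char) : hmuTr (hmuTr c) = hmuTr c := by
  by_cases h1 : c = 'A';  · subst h1; rfl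
  by_cases h2 : c = 'O';  · subst h2; rfl
  by_cases h3 : c = 'a';  · subst h3; rfl
  by_cases h4 : c = 'o';  · subst h4; rfl
  by_cases h5 : c = 'E';  · subst h5; rfl
  by_cases h6 : c = 'U';  · subst h6; rfl
  by_cases h7 : c = 'e';  · subst h7; rfl
  by_cases h8 : c = 'u';  · subst h8; rfl
  by_cases h9 : c = 'I';  · subst h9; rfl
  by_cases h10 : c = 'Y';  · subst h10; rfl
  by_cases h11 : c = 'i';  · subst h11; rfl
  by_cases h12 : c = 'y';  · subst h12; rfl
  rw [hmuTr_other c h1 h2 h3 h4 h5 h6 h7 h8 h9 h10 h11 h12, hmuTr_other c h1 h2 h3 h4 h5 h6 h7 h8 h9 h10 h11 h12]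

theorem hmuPass_idem (s : String) : hmuPass (hmuPass s) = hmuPass s := by
  have h : (hmuPass (hmuPass s)).toList = (hmuPass s).toList := by
    rw [hmuPass_toList, hmuPass_toList, List.map_map]
    exact List.map_congr_left (fun c _ => hmuTr_idem c)
  have := congrArg String.ofList h
  simpa using this

theorem foldl_pass (l : List Char) (s : String) :
    l.foldl (fun acc _ => hmuPass acc) (hmuPass s) = hmuPass s := by
  induction l generalizing s with
  | nil => rfl
  | cons c t ih => simp only [List.foldl_cons, hmuPass_idem]; exact ih s

-- ===== VERDICT (by name: the statement is the Claim_ definition above) =====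
theorem heavy_metal_umlauts_spec : Claim_equal_heavy_metal_umlauts := by
  intro s _
  show heavy_metal_umlauts s = heavy_metal_umlauts_alt s
  unfold heavy_metal_umlauts
  cases h : s.toList with
  | nil =>
      have hs : s = "" := by
        have := congrArg String.ofList h
        simpa using this
      subst hs
      rfl
  | cons c t =>
      simp only [List.foldl_cons]
      rw [foldl_pass]
      have hofl : hmuPass s = String.ofList ((hmuPass s).toList) := by simp
      rw [hofl, hmuPass_toList]
      rfl
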